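-- pv_equiv track=rewrite | github.com/Reskal/E1E119011_RESKAL | R-1.3.py | minmax
-- ===== SOURCE A (Python) =====
-- def minmax(data):
--     largest = data[0]
--     smallest = data[0]
--     for item in data:
--         if item > largest:
--             largest = item
--         elif item < smallest:
--             smallest = item
--     return smallest, largest
-- ===== SOURCE B (Python) =====
-- def minmax(data):
--     s = sorted(data)
--     return s[0], s[-1]
-- ===== Notes on version B (the rewrite author's own statement) =====
-- stated objective: simpler
-- what changed: Replaced the single-pass compare-and-update scan with sorting the data and reading the first and last elements of the sorted list.
import Mathlib
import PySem

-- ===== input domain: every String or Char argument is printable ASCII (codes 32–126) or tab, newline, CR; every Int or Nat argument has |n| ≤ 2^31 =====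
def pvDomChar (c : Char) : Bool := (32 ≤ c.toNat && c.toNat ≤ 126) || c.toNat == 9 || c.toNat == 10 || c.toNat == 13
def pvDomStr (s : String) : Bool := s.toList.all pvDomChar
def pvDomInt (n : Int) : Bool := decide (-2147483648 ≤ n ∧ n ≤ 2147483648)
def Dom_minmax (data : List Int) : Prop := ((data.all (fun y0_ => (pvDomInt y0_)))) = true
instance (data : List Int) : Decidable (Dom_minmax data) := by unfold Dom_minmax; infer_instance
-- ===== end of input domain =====

-- B sorts the data and reads the endpoints of the sorted list, instead of A's
-- single compare-and-update scan (return values only; neither mutates its input).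

-- ===== PORT A =====
def minmax (data : List Int) : Int × Int :=
  let first := (PySem.List.pyGet? data 0).getD 0   -- data[0]; none case excluded by Pre_
  let st := data.foldl
    (fun (st : Int × Int) item =>
      if item > st.2 then (st.1, item)
      else if item < st.1 then (item, st.2)
      else st)
    (first, first)
  (st.1, st.2)

-- ===== PORT B =====
def minmax_alt (data : List Int) : Int × Int :=
  let s := PySem.List.sorted data (fun x => x) false
  ((PySem.List.pyGet? s 0).getD 0, (PySem.List.pyGet? s (-1)).getD 0)

-- ===== PRECONDITION & SPEC =====
-- Pre_ excludes only the empty list, on which A raises IndexError (and B raises too).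
def Pre_minmax (data : List Int) : Prop := data ≠ []
instance (data : List Int) : Decidable (Pre_minmax data) := by unfold Pre_minmax; infer_instance

def pvWitness_minmax : List Int := [3, -1, 4, 1, 5]

def Spec_minmax (data : List Int) (out : Int × Int) : Prop := out = minmax_alt data
instance (data : List Int) (out : Int × Int) : Decidable (Spec_minmax data out) := by unfold Spec_minmax; infer_instance

-- ===== CLAIM (what is proved, stated in full; the proofs are below) =====
def Claim_equal_minmax : Prop := ∀ (data : List Int), Dom_minmax data → Pre_minmax data → Spec_minmax data (minmax data)

-- ===== LEMMAS AND PROOFS =====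

-- A's loop, started from (m, M) with m ≤ M, computes the running min and max.
theorem foldA_eq_min_max (xs : List Int) (m M : Int) (h : m ≤ M) :
    xs.foldl
      (fun (st : Int × Int) item =>
        if item > st.2 then (st.1, item)
        else if item < st.1 then (item, st.2)
        else st)
      (m, M)
    = (xs.foldl min m, xs.foldl max M) := by
  induction xs generalizing m M with
  | nil => rfl
  | cons x t ih =>
    simp only [List.foldl_cons]
    by_cases hx : x > M
    · simp only [if_pos hx]
      have h1 : min m x = m := min_eq_left (by omega)
      have h2 : max M x = x := max_eq_right (by omega)
      rw [ih m x (by omega), h1, h2]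
    · simp only [if_neg hx]
      by_cases hx2 : x < m
      · simp only [if_pos hx2]
        have h1 : min m x = x := min_eq_right (by omega)
        have h2 : max M x = M := max_eq_left (by omega)
        rw [ih x M (by omega), h1, h2]
      · simp only [if_neg hx2]
        have h1 : min m x = m := min_eq_left (by omega)
        have h2 : max M x = M := max_eq_left (by omega)
        rw [ih m M h, h1, h2]

theorem foldl_min_le (xs : List Int) (a : Int) :
    xs.foldl min a ≤ a ∧ ∀ y ∈ xs, xs.foldl min a ≤ y := by
  induction xs generalizing a with
  | nil => simp
  | cons x t ih =>
    obtain ⟨h1, h2⟩ := ih (min a x)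
    refine ⟨le_trans h1 (min_le_left _ _), ?_⟩
    intro y hy
    rcases List.mem_cons.mp hy with rfl | hy
    · exact le_trans h1 (min_le_right _ _)
    · exact h2 y hy

theorem foldl_max_ge (xs : List Int) (a : Int) :
    a ≤ xs.foldl max a ∧ ∀ y ∈ xs, y ≤ xs.foldl max a := by
  induction xs generalizing a with
  | nil => simp
  | cons x t ih =>
    obtain ⟨h1, h2⟩ := ih (max a x)
    refine ⟨le_trans (le_max_left _ _) h1, ?_⟩
    intro y hy
    rcases List.mem_cons.mp hy with rfl | hy
    · exact le_trans (le_max_right _ _) h1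
    · exact h2 y hy

theorem foldl_min_mem (xs : List Int) (a : Int) :
    xs.foldl min a = a ∨ xs.foldl min a ∈ xs := by
  induction xs generalizing a with
  | nil => simp
  | cons x t ih =>
    rcases ih (min a x) with h | h
    · rcases min_cases a x with ⟨he, _⟩ | ⟨he, _⟩
      · exact Or.inl (by rw [List.foldl_cons, h, he])
      · exact Or.inr (by rw [List.foldl_cons, h, he]; exact List.mem_cons_self)
    · exact Or.inr (List.mem_cons_of_mem _ h)

theorem foldl_max_mem (xs : List Int) (a : Int) :
    xs.foldl max a = a ∨ xs.foldl max a ∈ xs := by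
  induction xs generalizing a with
  | nil => simp
  | cons x t ih =>
    rcases ih (max a x) with h | h
    · rcases max_cases a x with ⟨he, _⟩ | ⟨he, _⟩
      · exact Or.inl (by rw [List.foldl_cons, h, he])
      · exact Or.inr (by rw [List.foldl_cons, h, he]; exact List.mem_cons_self)
    · exact Or.inr (List.mem_cons_of_mem _ h)

-- In a ≤-pairwise (i.e. sorted) nonempty list the last element bounds every element.
theorem pairwise_le_getLast (s : List Int) (hs : s.Pairwise (fun a b => (a : Int) ≤ b))
    (hne : s ≠ []) : ∀ y ∈ s, y ≤ s.getLast hne := by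
  induction s with
  | nil => exact absurd rfl hne
  | cons x t ih =>
    intro y hy
    cases t with
    | nil => simp at hy; simp [hy]
    | cons z u =>
      have hs' := (List.pairwise_cons.mp hs)
      rw [List.getLast_cons (by simp)]
      rcases List.mem_cons.mp hy with rfl | hy
      · exact le_trans (hs'.1 _ List.mem_cons_self)
          (ih hs'.2 (by simp) _ List.mem_cons_self)
      · exact ih hs'.2 (by simp) y hy

theorem minmax_agree (data : List Int) (hne : data ≠ []) :
    minmax data = minmax_alt data := by
  obtain ⟨d, t, rfl⟩ := List.exists_cons_of_ne_nil hne
  -- A's side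
  have hA : minmax (d :: t) = ((d :: t).foldl min d, (d :: t).foldl max d) := by
    simp only [minmax, PySem.List.pyGet?_zero_cons, Option.getD_some]
    rw [foldA_eq_min_max _ d d le_rfl]
  -- B's side: the sorted list
  set s := PySem.List.sorted (d :: t) (fun x => x) false with hsdef
  have hperm : s.Perm (d :: t) := PySem.List.sorted_perm _ _ _
  have hsne : s ≠ [] := by
    intro h0
    have := hperm.length_eq
    simp [h0] at this
  obtain ⟨h0, r, hsr⟩ := List.exists_cons_of_ne_nil hsne
  have hpw : s.Pairwise (fun a b => (a : Int) ≤ b) := by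
    have := PySem.List.sorted_pairwise (xs := d :: t) (key := fun x : Int => x)
    simpa using this
  have hmem : ∀ y, y ∈ s ↔ y ∈ d :: t := fun y => hperm.mem_iff
  -- head of s equals A's smallest
  have hminA_le : ∀ y ∈ (d :: t), (d :: t).foldl min d ≤ y :=
    (foldl_min_le (d :: t) d).2
  have hminA_mem : (d :: t).foldl min d ∈ (d :: t) := by
    rcases foldl_min_mem (d :: t) d with h | h
    · rw [h]; exact List.mem_cons_self
    · exact h
  have hhead_le : ∀ y ∈ (d :: t), h0 ≤ y := by
    intro y hy
    have := PySem.List.key_head_sorted_le (xs := d :: t) (key := fun x : Int => x)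
      (hsdef.symm.trans hsr)
    simpa using this y hy
  have hhead_mem : h0 ∈ (d :: t) := (hmem h0).mp (hsr ▸ List.mem_cons_self)
  have hmin_eq : h0 = (d :: t).foldl min d :=
    le_antisymm (hhead_le _ hminA_mem) (hminA_le _ hhead_mem)
  -- last of s equals A's largest
  have hlast_ge : ∀ y ∈ (d :: t), y ≤ s.getLast hsne := by
    intro y hy
    exact pairwise_le_getLast s hpw hsne y ((hmem y).mpr hy)
  have hlast_mem : s.getLast hsne ∈ (d :: t) := (hmem _).mp (List.getLast_mem hsne)
  have hmaxA_ge : ∀ y ∈ (d :: t), y ≤ (d :: t).foldl max d :=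
    (foldl_max_ge (d :: t) d).2
  have hmaxA_mem : (d :: t).foldl max d ∈ (d :: t) := by
    rcases foldl_max_mem (d :: t) d with h | h
    · rw [h]; exact List.mem_cons_self
    · exact h
  have hmax_eq : s.getLast hsne = (d :: t).foldl max d :=
    le_antisymm (hmaxA_ge _ hlast_mem) (hlast_ge _ hmaxA_mem)
  -- assemble B's value
  have hB : minmax_alt (d :: t) = (h0, s.getLast hsne) := by
    have hget0 : PySem.List.pyGet? s 0 = some h0 := by
      rw [hsr]; exact PySem.List.pyGet?_zero_cons _ _
    simp only [minmax_alt, ← hsdef, PySem.List.pyGet?_neg_one, hget0,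
      List.getLast?_eq_some_getLast hsne, Option.getD_some]
  rw [hA, hB, hmin_eq, hmax_eq]

-- ===== VERDICT (by name: the statement is the Claim_ definition above) =====
theorem minmax_spec : Claim_equal_minmax := by
  intro data _ hpre
  unfold Spec_minmax
  exact minmax_agree data hpre
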